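-- pv_equiv track=rewrite | github.com/DawZaw/AdventOfCode2023 | day14/day_14.py | get_total_score
-- ===== SOURCE A (Python) =====
-- def get_total_score(data: list[list[str]]) -> int:
--     width: int = len(data[0])
--     height: int = len(data)
--
--     current_scores: list[int] = [0] * width
--     for i, row in enumerate(data):
--         for j, col in enumerate(row):
--             if col == "O":
--                 current_scores[j] += height - i
--     return sum(current_scores)
-- ===== SOURCE B (Python) =====
-- def get_total_score(data: list[list[str]]) -> int:
--     # Prefix-count reformulation: a rock in row i contributes height - i, which
--     # equals the number of rows from i to the bottom, so the total equals the
--     # sum over rows of the cumulative rock count seen so far.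
--     total = 0
--     seen = 0
--     for row in data:
--         seen += row.count("O")
--         total += seen
--     return total
-- ===== Notes on version B (the rewrite author's own statement) =====
-- stated objective: alternative
-- what changed: Replaces A's per-column accumulator and per-cell (height - i) weight additions by a prefix-count scan: a running count of rocks seen so far is added to the total once per row (Sum (height-i)*c_i = Sum of prefix counts), so B never computes width, height or any weight.
-- outside the precondition, e.g. on get_total_score([]): A raises IndexError, B returns 0; on get_total_score([['.'], ['O', 'O']]): A raises IndexError, B returns 2
import Mathlib
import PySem

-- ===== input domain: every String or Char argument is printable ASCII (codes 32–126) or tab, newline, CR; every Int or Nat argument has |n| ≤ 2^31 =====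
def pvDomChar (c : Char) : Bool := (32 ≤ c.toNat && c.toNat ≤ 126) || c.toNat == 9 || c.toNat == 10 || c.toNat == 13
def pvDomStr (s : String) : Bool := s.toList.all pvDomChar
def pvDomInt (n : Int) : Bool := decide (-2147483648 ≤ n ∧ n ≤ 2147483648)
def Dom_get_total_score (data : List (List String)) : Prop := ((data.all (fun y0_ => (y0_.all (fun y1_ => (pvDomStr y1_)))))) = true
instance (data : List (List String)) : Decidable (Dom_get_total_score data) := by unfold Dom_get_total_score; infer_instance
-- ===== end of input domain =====

-- B replaces A's per-column accumulator and per-cell (height - i) weights by a running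
-- prefix count of rocks added once per row (same cost, different algorithm).

-- ===== PORT A =====
def get_total_score (data : List (List String)) : Int :=
  match PySem.List.pyGet? data 0 with
  | none => 0  -- data[0] raises IndexError; excluded by Pre_
  | some row0 =>
    let width : Int := (row0.length : Int)
    let height : Int := (data.length : Int)
    let scores : List Int := List.replicate width.toNat 0
    ((PySem.List.enumerate data 0).foldl (fun sc p =>
        (PySem.List.enumerate p.2 0).foldl (fun sc q =>
            if q.2 == "O" then
              -- current_scores[j] += height - i ; j is in range on Pre_ (out of range Python raises)
              sc.set q.1.toNat (PySem.List.pyGetD sc q.1 0 + (height - p.1))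
            else sc) sc) scores).sum

-- ===== PORT B =====
def get_total_score_alt (data : List (List String)) : Int :=
  (data.foldl (fun st row =>
      let seen := st.2 + (PySem.List.count row "O" : Int)
      (st.1 + seen, seen)) ((0 : Int), (0 : Int))).1

-- ===== PRECONDITION & SPEC =====
-- Pre_ excludes exactly the inputs where A raises IndexError: empty data (len(data[0])),
-- and rows carrying an "O" at an index >= len(data[0]) (the write current_scores[j] is out of range).
def Pre_get_total_score (data : List (List String)) : Prop :=
  data ≠ [] ∧ ∀ row ∈ data, ∀ c ∈ row.drop (data.headD []).length, c ≠ "O"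
instance (data : List (List String)) : Decidable (Pre_get_total_score data) := by
  unfold Pre_get_total_score; infer_instance
def pvWitness_get_total_score : List (List String) := [["O", "."], [".", "O"]]

def Spec_get_total_score (data : List (List String)) (out : Int) : Prop := out = get_total_score_alt data
instance (data : List (List String)) (out : Int) : Decidable (Spec_get_total_score data out) := by unfold Spec_get_total_score; infer_instance

-- ===== CLAIM (what is proved, stated in full; the proofs are below) =====
def Claim_equal_get_total_score : Prop := ∀ (data : List (List String)), Dom_get_total_score data → Pre_get_total_score data → Spec_get_total_score data (get_total_score data)

-- ===== LEMMAS AND PROOFS =====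

-- Weighted row sum: pvW h rows = h*c(row0) + (h-1)*c(row1) + …
def pvW (h : Int) : List (List String) → Int
  | [] => 0
  | r :: rs => h * (PySem.List.count r "O" : Int) + pvW (h - 1) rs

-- Adding into one in-range slot raises the sum by the added amount.
theorem pv_sum_set_add (a : Int) : ∀ (sc : List Int) (k : Nat), k < sc.length →
    (sc.set k (sc.getD k 0 + a)).sum = sc.sum + a := by
  intro sc
  induction sc with
  | nil => intro k h; simp at h
  | cons x xs ih =>
    intro k h
    cases k with
    | zero => simp [List.sum_cons]; ring
    | succ n =>
      simp only [List.set_cons_succ, List.getD_cons_succ, List.sum_cons]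
      rw [ih n (by simpa using h)]
      ring

-- The inner loop preserves the length of the score list.
theorem pv_inner_len (height i : Int) : ∀ (row : List String) (s : Int) (sc : List Int),
    ((PySem.List.enumerate row s).foldl (fun sc q =>
        if q.2 == "O" then sc.set q.1.toNat (PySem.List.pyGetD sc q.1 0 + (height - i)) else sc)
      sc).length = sc.length := by
  intro row
  induction row with
  | nil => intro s sc; simp [PySem.List.enumerate]
  | cons c cs ih =>
    intro s sc
    rw [PySem.List.enumerate_cons, List.foldl_cons]
    rw [ih]
    by_cases h : c == "O" <;> simp [h]

-- Inner loop: summing the updated score list adds (height - i) per "O" in the row,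
-- provided every "O" sits at an in-range index.
theorem pv_inner_sum (height i : Int) : ∀ (row : List String) (s : Nat) (sc : List Int),
    (∀ k, (h : k < row.length) → row[k] = "O" → s + k < sc.length) →
    ((PySem.List.enumerate row (s : Int)).foldl (fun sc q =>
        if q.2 == "O" then sc.set q.1.toNat (PySem.List.pyGetD sc q.1 0 + (height - i)) else sc)
      sc).sum = sc.sum + (height - i) * (List.count "O" row : Int) := by
  intro row
  induction row with
  | nil => intro s sc _; simp [PySem.List.enumerate]
  | cons c cs ih =>
    intro s sc H
    rw [PySem.List.enumerate_cons, List.foldl_cons]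
    have hcast : (s : Int) + 1 = ((s + 1 : Nat) : Int) := by push_cast; ring
    by_cases hc : c = "O"
    · have hlt : s < sc.length := by
        have := H 0 (by simp) (by simpa using hc); simpa using this
      simp only [hc, beq_self_eq_true, if_pos]
      have hset : ((s : Int)).toNat = s := by simp
      rw [hset, PySem.List.pyGetD_natCast, hcast,
        ih (s + 1) (sc.set s (sc.getD s 0 + (height - i)))
          (by
            intro k hk hO
            rw [List.length_set]
            have := H (k + 1) (by simpa using Nat.succ_lt_succ hk) (by simpa using hO)
            omega)]
      rw [pv_sum_set_add _ _ _ hlt]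
      simp
      ring
    · have hb : (c == "O") = false := by simpa using hc
      simp only [hb, Bool.false_eq_true, if_false]
      rw [hcast, ih (s + 1) sc
        (by intro k hk hO
            have := H (k + 1) (by simpa using Nat.succ_lt_succ hk) (by simpa using hO)
            omega)]
      simp [hc]

-- Outer loop: the score-array sum equals the weighted row sum pvW (height - i).
theorem pv_outer (height : Int) : ∀ (rows : List (List String)) (i : Int) (sc : List Int),
    (∀ row ∈ rows, ∀ c ∈ row.drop sc.length, c ≠ "O") →
    ((PySem.List.enumerate rows i).foldl (fun sc p =>
        (PySem.List.enumerate p.2 0).foldl (fun sc q =>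
            if q.2 == "O" then sc.set q.1.toNat (PySem.List.pyGetD sc q.1 0 + (height - p.1)) else sc)
          sc) sc).sum
      = sc.sum + pvW (height - i) rows := by
  intro rows
  induction rows with
  | nil => intro i sc _; simp [PySem.List.enumerate, pvW]
  | cons r rs ih =>
    intro i sc H
    rw [PySem.List.enumerate_cons, List.foldl_cons]
    have Hr : ∀ k, (h : k < r.length) → r[k] = "O" → 0 + k < sc.length := by
      intro k hk hO
      by_contra hge
      have hkge : sc.length ≤ k := by omega
      have : r[k] ∈ r.drop sc.length := by
        have hkd : k - sc.length < (r.drop sc.length).length := by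
          rw [List.length_drop]; omega
        have := List.getElem_mem (l := r.drop sc.length) (n := k - sc.length) hkd
        rw [List.getElem_drop] at this
        simpa only [show sc.length + (k - sc.length) = k from by omega] using this
      exact H r (by simp) _ (by rwa [hO] at this) rfl
    have hinner := pv_inner_sum height i r 0 sc Hr
    simp only [Nat.cast_zero] at hinner
    rw [ih (i + 1) _ (by
      intro row hrow c hc
      rw [pv_inner_len] at hc
      exact H row (by simp [hrow]) c hc)]
    rw [hinner, pvW, PySem.List.count_eq]
    have h2 : height - i - 1 = height - (i + 1) := by ring
    rw [h2]
    ring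

-- B's fold from state (t, s) returns t + s·n + pvW n rows (n = rows.length).
theorem pv_fold_prefix : ∀ (rows : List (List String)) (t s : Int),
    (rows.foldl (fun st row =>
        let seen := st.2 + (PySem.List.count row "O" : Int)
        (st.1 + seen, seen)) (t, s)).1
      = t + s * (rows.length : Int) + pvW (rows.length : Int) rows := by
  intro rows
  induction rows with
  | nil => intro t s; simp [pvW]
  | cons r rs ih =>
    intro t s
    rw [List.foldl_cons]
    simp only [List.length_cons]
    rw [ih, pvW]
    have h1 : ((rs.length + 1 : Nat) : Int) - 1 = (rs.length : Int) := by push_cast; ring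
    rw [h1]
    push_cast
    ring

theorem get_total_score_spec : Claim_equal_get_total_score := by
  intro data _ hpre
  obtain ⟨hne, hO⟩ := hpre
  obtain ⟨r0, rest, rfl⟩ : ∃ r0 rest, data = r0 :: rest := by
    cases data with
    | nil => exact absurd rfl hne
    | cons a b => exact ⟨a, b, rfl⟩
  unfold Spec_get_total_score get_total_score get_total_score_alt
  rw [PySem.List.pyGet?_zero_cons]
  simp only []
  rw [pv_outer (((r0 :: rest).length : Nat) : Int) (r0 :: rest) 0 (List.replicate ((r0.length : Int)).toNat 0)
    (by
      intro row hrow c hc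
      simp only [List.length_replicate, Int.toNat_natCast] at hc
      exact hO row hrow c (by simpa using hc))]
  rw [pv_fold_prefix]
  simp
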